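-- pv_equiv track=rewrite | github.com/jamesshancock/NSP | NSPQUBO.py | labelling
-- ===== SOURCE A (Python) =====
-- def labelling(N,D):
--     '''
--     This returns the variable labelling for the QUBO
--     '''
--
--     variables = []
--     for i in range(N):
--         for j in range(D):
--             variables.append((i,j))
--     labels = {}
--     for i in range(len(variables)):
--         labels[variables[i]] = i
--     return labels
-- ===== SOURCE B (Python) =====
-- def labelling(N, D):
--     '''
--     This returns the variable labelling for the QUBO
--     '''
--     return {(i, j): i * D + j for i in range(N) for j in range(D)}
-- ===== Notes on version B (the rewrite author's own statement) =====
-- stated objective: simpler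
-- what changed: Replaces the two-pass build (materialize a row-major list of (i,j) pairs, then enumerate it into a dict by a second indexed loop) with a single dict comprehension that computes each pair's position arithmetically as i*D + j.
import Mathlib
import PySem

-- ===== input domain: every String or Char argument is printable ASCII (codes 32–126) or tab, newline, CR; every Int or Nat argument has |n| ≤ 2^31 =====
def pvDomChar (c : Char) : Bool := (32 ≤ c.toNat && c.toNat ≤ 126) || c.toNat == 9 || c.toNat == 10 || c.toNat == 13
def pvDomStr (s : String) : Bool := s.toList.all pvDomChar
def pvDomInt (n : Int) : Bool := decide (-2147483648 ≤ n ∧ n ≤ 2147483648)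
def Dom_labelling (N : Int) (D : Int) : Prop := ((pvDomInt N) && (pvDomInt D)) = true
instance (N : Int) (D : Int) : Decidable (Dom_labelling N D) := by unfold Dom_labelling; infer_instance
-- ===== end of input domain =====

-- B builds the dict in one comprehension with the closed-form index i*D + j, instead of
-- A's intermediate list of pairs plus a second indexing pass (objective: simpler).

-- ===== PORT A =====
-- dict keyed by (i, j) with Int values; returned as the items list flattened to triples
def labelling (N : Int) (D : Int) : List (Int × Int × Int) :=
  let vars : List (Int × Int) :=
    (PySem.List.pyRange 0 N).foldl (fun acc i =>
      (PySem.List.pyRange 0 D).foldl (fun acc2 j => acc2 ++ [(i, j)]) acc) []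
  let labels : PySem.Dict (Int × Int) Int :=
    (PySem.List.pyRange 0 (vars.length : Int)).foldl (fun d i =>
      match PySem.List.pyGet? vars i with   -- vars[i]; always in range in this loop
      | some key => d.insert key i
      | none => d) PySem.Dict.empty
  labels.items.map (fun p => (p.1.1, p.1.2, p.2))

-- ===== PORT B =====
def labelling_alt (N : Int) (D : Int) : List (Int × Int × Int) :=
  (PySem.List.pyRange 0 N).flatMap (fun i =>
    (PySem.List.pyRange 0 D).map (fun j => (i, j, i * D + j)))

-- ===== PRECONDITION & SPEC =====
def Spec_labelling (N : Int) (D : Int) (out : List (Int × Int × Int)) : Prop := out = labelling_alt N D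
instance (N : Int) (D : Int) (out : List (Int × Int × Int)) : Decidable (Spec_labelling N D out) := by unfold Spec_labelling; infer_instance

-- ===== CLAIM (what is proved, stated in full; the proofs are below) =====
def Claim_equal_labelling : Prop := ∀ (N : Int) (D : Int), Dom_labelling N D → Spec_labelling N D (labelling N D)

-- ===== LEMMAS AND PROOFS =====

-- one row of A's intermediate list: the pairs (i, j) for j in range(D)
def rowsFn (D : Int) (i : Int) : List (Int × Int) :=
  (PySem.List.pyRange 0 D).map (fun j => (i, j))

theorem nodup_rows (D : Int) : ∀ (n : Nat) (a N : Int), (N - a).toNat = n →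
    ((PySem.List.pyRange a N).flatMap (rowsFn D)).Nodup := by
  intro n
  induction n with
  | zero =>
    intro a N h
    rw [PySem.List.pyRange_one_eq_nil (by omega)]
    simp
  | succ n ih =>
    intro a N h
    rw [PySem.List.pyRange_one_cons (by omega), List.flatMap_cons]
    refine List.Nodup.append ?_ (ih (a + 1) N (by omega)) ?_
    · exact (PySem.List.nodup_pyRange_one 0 D).map
        (fun x y hxy => by simpa using hxy)
    · intro p hp hq
      simp only [rowsFn, List.mem_map] at hp
      obtain ⟨j, _, rfl⟩ := hp
      simp only [List.mem_flatMap, rowsFn, List.mem_map] at hq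
      obtain ⟨i, hi, j', _, hpq⟩ := hq
      rw [PySem.List.mem_pyRange_one] at hi
      have : i = a := by
        have := congrArg Prod.fst hpq
        simpa using this
      omega

theorem enum_map {β γ : Type} (f : β → γ) : ∀ (xs : List β) (s : Int),
    PySem.List.enumerate (xs.map f) s
      = (PySem.List.enumerate xs s).map (fun p => (p.1, f p.2)) := by
  intro xs
  induction xs with
  | nil => intro s; simp [PySem.List.enumerate_nil]
  | cons x xs ih => intro s; simp [PySem.List.enumerate_cons, ih]

theorem enum_pyRange (D s : Int) :
    PySem.List.enumerate (PySem.List.pyRange 0 D) s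
      = (PySem.List.pyRange 0 D).map (fun j => (s + j, j)) := by
  apply List.ext_getElem?
  intro k
  simp only [PySem.List.getElem?_enumerate, List.getElem?_map,
    PySem.List.getElem?_pyRange_one]
  split <;> simp

theorem rowlem (a s D : Int) :
    (PySem.List.enumerate (rowsFn D a) s).map (fun p => (p.2.1, p.2.2, p.1))
      = (PySem.List.pyRange 0 D).map (fun j => (a, j, s + j)) := by
  unfold rowsFn
  rw [enum_map, enum_pyRange]
  simp [List.map_map, Function.comp]

theorem enum_rows (D : Int) (hD : 0 ≤ D) : ∀ (n : Nat) (a N : Int), (N - a).toNat = n →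
    (PySem.List.enumerate ((PySem.List.pyRange a N).flatMap (rowsFn D)) (a * D)).map
        (fun p => (p.2.1, p.2.2, p.1))
      = (PySem.List.pyRange a N).flatMap (fun i =>
          (PySem.List.pyRange 0 D).map (fun j => (i, j, i * D + j))) := by
  intro n
  induction n with
  | zero =>
    intro a N h
    rw [PySem.List.pyRange_one_eq_nil (by omega)]
    simp [PySem.List.enumerate_nil]
  | succ n ih =>
    intro a N h
    rw [PySem.List.pyRange_one_cons (by omega), List.flatMap_cons, List.flatMap_cons,
      PySem.List.enumerate_append, List.map_append]
    have hlen : ((rowsFn D a).length : Int) = D := by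
      simp [rowsFn, PySem.List.length_pyRange_one]
      omega
    rw [hlen, show a * D + D = (a + 1) * D by ring, rowlem, ih (a + 1) N (by omega)]

theorem dictloop (vs : List (Int × Int)) (h : vs.Nodup) :
    ((PySem.List.pyRange 0 (vs.length : Int)).foldl (fun d i =>
        match PySem.List.pyGet? vs i with
        | some key => d.insert key i
        | none => d) (PySem.Dict.empty : PySem.Dict (Int × Int) Int)).items
      = (PySem.List.enumerate vs 0).map (fun p => (p.2, p.1)) := by
  rw [PySem.List.foldl_congr_mem _ _
      (fun d i => d.insert (PySem.List.pyGetD vs i ((0 : Int), (0 : Int))) i) _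
      (by
        intro d i hi
        rw [PySem.List.mem_pyRange_one] at hi
        simp only [PySem.List.pyGet?_eq_some_getElem vs hi.1 hi.2,
          PySem.List.pyGetD_eq_getElem vs _ hi.1 hi.2])]
  rw [PySem.Dict.items_foldl_insert_fresh _
      (fun i => PySem.List.pyGetD vs i ((0 : Int), (0 : Int))) (fun i => i) _
      (fun a _ => PySem.Dict.contains_empty _)
      (by rw [PySem.List.map_pyGetD_pyRange_zero']; exact h)]
  rw [PySem.List.enumerate_eq_map_pyRange vs ((0 : Int), (0 : Int)), List.map_map]
  simp [Function.comp_def, PySem.List.len_eq, PySem.Dict.empty]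

theorem labelling_main (N D : Int) : labelling N D = labelling_alt N D := by
  have hvars : (PySem.List.pyRange 0 N).foldl (fun acc i =>
      (PySem.List.pyRange 0 D).foldl (fun acc2 j => acc2 ++ [(i, j)]) acc) []
      = (PySem.List.pyRange 0 N).flatMap (rowsFn D) := by
    rw [PySem.List.foldl_congr_mem _ _ (fun acc i => acc ++ rowsFn D i) _
        (fun acc i _ => PySem.List.foldl_append_singleton_eq_map _ _ _)]
    rw [PySem.List.foldl_append_eq_flatMap]
    simp
  simp only [labelling, labelling_alt, hvars]
  rw [dictloop _ (nodup_rows D ((N - 0).toNat) 0 N rfl), List.map_map]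
  by_cases hD : 0 ≤ D
  · have := enum_rows D hD ((N - 0).toNat) 0 N rfl
    rw [zero_mul] at this
    rw [← this]
    rfl
  · have hnil : rowsFn D = fun _ => [] := by
      funext i
      simp [rowsFn, PySem.List.pyRange_one_eq_nil (by omega : D ≤ 0)]
    have h0 : (PySem.List.pyRange 0 N).flatMap (fun _ => ([] : List (Int × Int))) = [] := by
      induction PySem.List.pyRange 0 N with
      | nil => rfl
      | cons x xs ih => simp [ih]
    rw [hnil, h0]
    simp [PySem.List.enumerate_nil, PySem.List.pyRange_one_eq_nil (by omega : D ≤ 0)]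

-- ===== VERDICT (by name: the statement is the Claim_ definition above) =====
theorem labelling_spec : Claim_equal_labelling := by
  intro N D _
  unfold Spec_labelling
  exact labelling_main N D
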